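-- pv_equiv track=rewrite | github.com/pheonix-lord/TicTacToe-Console-Python | app.py | best_moves_from_board
-- ===== SOURCE A (Python) =====
-- combo_indices = [
--     [0, 1, 2],
--     [3, 4, 5],
--     [6, 7, 8],
--     [0, 3, 6],
--     [1, 4, 7],
--     [2, 5, 8],
--     [0, 4, 8],
--     [2, 4, 6],
-- ]
--
-- EMPTY_SIGN = '.'
--
-- AI_SIGN = 'X'
--
-- OPPONENT_SIGN = 'O'
--
-- def best_moves_from_board(board, sign):
--     move_list = []
--     utilities = utility_matrix(board)
--     max_utility = max(utilities)
--     for i, v in enumerate(board):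
--         if utilities[i] == max_utility:
--             move_list.append(board[:i] + sign + board[i + 1:])
--     return move_list
--
-- def init_utility_matrix(board):
--     return [0 if cell == EMPTY_SIGN else -1 for cell in board]
--
-- def generate_add_score(utilities, i, j, k):
--     def add_score(points):
--         if utilities[i] >= 0:
--             utilities[i] += points
--         if utilities[j] >= 0:
--             utilities[j] += points
--         if utilities[k] >= 0:
--             utilities[k] += points
--     return add_score
--
-- def utility_matrix(board):
--     utilities = init_utility_matrix(board)
--     for [i, j, k] in combo_indices:
--         add_score = generate_add_score(utilities, i, j, k)
--         triple = [board[i], board[j], board[k]]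
--         if triple.count(EMPTY_SIGN) == 1:
--             if triple.count(AI_SIGN) == 2:
--                 add_score(1000)
--             elif triple.count(OPPONENT_SIGN) == 2:
--                 add_score(100)
--         elif triple.count(EMPTY_SIGN) == 2 and triple.count(AI_SIGN) == 1:
--             add_score(10)
--         elif triple.count(EMPTY_SIGN) == 3:
--             add_score(1)
--     return utilities
-- ===== SOURCE B (Python) =====
-- combo_indices = [
--     [0, 1, 2],
--     [3, 4, 5],
--     [6, 7, 8],
--     [0, 3, 6],
--     [1, 4, 7],
--     [2, 5, 8],
--     [0, 4, 8],
--     [2, 4, 6],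
-- ]
--
-- EMPTY_SIGN = '.'
--
-- AI_SIGN = 'X'
--
-- OPPONENT_SIGN = 'O'
--
-- def combo_score(triple):
--     e = triple.count(EMPTY_SIGN)
--     if e == 1:
--         if triple.count(AI_SIGN) == 2:
--             return 1000
--         if triple.count(OPPONENT_SIGN) == 2:
--             return 100
--         return 0
--     if e == 2 and triple.count(AI_SIGN) == 1:
--         return 10
--     if e == 3:
--         return 1
--     return 0
--
-- def best_moves_from_board(board, sign):
--     # score each combo once, then gather: cell-outer / combo-inner
--     # instead of A's combo-outer scatter through a mutating closure
--     scores = [combo_score([board[i], board[j], board[k]]) for i, j, k in combo_indices]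
--     utilities = [
--         -1 if board[p] != EMPTY_SIGN else
--         sum(s for c, s in zip(combo_indices, scores) if p in c)
--         for p in range(len(board))
--     ]
--     m = max(utilities)
--     return [board[:p] + sign + board[p + 1:]
--             for p in range(len(board)) if utilities[p] == m]
-- ===== Notes on version B (the rewrite author's own statement) =====
-- stated objective: alternative
-- what changed: Replaced the combo-outer scatter (mutating a utilities array through the generate_add_score closure) with a cell-outer gather: each cell's utility is -1 if occupied, else the sum of the scores of the combos containing it; generate_add_score and init_utility_matrix disappear.
import Mathlib
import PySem

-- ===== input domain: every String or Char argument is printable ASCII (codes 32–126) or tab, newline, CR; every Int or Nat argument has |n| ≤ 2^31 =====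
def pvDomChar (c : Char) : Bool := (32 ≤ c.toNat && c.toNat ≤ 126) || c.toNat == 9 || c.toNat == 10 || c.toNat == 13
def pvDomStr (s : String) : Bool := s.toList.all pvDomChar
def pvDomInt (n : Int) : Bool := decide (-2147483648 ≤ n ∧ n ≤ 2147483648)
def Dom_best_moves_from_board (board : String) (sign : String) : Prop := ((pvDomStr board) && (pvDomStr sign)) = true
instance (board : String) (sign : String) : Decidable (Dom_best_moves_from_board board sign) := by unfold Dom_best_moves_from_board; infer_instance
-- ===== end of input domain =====

-- B replaces A's combo-outer scatter (mutating a utility array through a closure) by a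
-- cell-outer gather (each empty cell sums the scores of the combos containing it); same cost.

-- ===== PORT A =====
-- shared module constant: combo_indices (each inner [i, j, k] list as a triple)
def pvComboIndices : List (Nat × Nat × Nat) :=
  [(0,1,2),(3,4,5),(6,7,8),(0,3,6),(1,4,7),(2,5,8),(0,4,8),(2,4,6)]

def pvInitUtilityMatrix (board : List Char) : List Int :=
  board.map (fun cell => if cell = '.' then (0 : Int) else -1)

-- one guarded in-place addition 'if utilities[i] >= 0: utilities[i] += points'
def pvSetG (u : List Int) (i : Nat) (points : Int) : List Int :=
  if 0 ≤ u.getD i 0 then u.set i (u.getD i 0 + points) else u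

-- generate_add_score's closure, applied: three guarded in-place additions
def pvAddScore (u : List Int) (i j k : Nat) (points : Int) : List Int :=
  pvSetG (pvSetG (pvSetG u i points) j points) k points

-- the body of utility_matrix's for-loop (board[i] is exact under Pre_: all combo indices < 9 ≤ len)
def pvStep (board : List Char) (u : List Int) (c : Nat × Nat × Nat) : List Int :=
  let triple := [board.getD c.1 ' ', board.getD c.2.1 ' ', board.getD c.2.2 ' ']
  if triple.count '.' = 1 then
    if triple.count 'X' = 2 then pvAddScore u c.1 c.2.1 c.2.2 1000
    else if triple.count 'O' = 2 then pvAddScore u c.1 c.2.1 c.2.2 100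
    else u
  else if triple.count '.' = 2 ∧ triple.count 'X' = 1 then pvAddScore u c.1 c.2.1 c.2.2 10
  else if triple.count '.' = 3 then pvAddScore u c.1 c.2.1 c.2.2 1
  else u

def pvUtilityMatrix (board : List Char) : List Int :=
  pvComboIndices.foldl (pvStep board) (pvInitUtilityMatrix board)

def best_moves_from_board (board : String) (sign : String) : List String :=
  let bl := board.toList
  let utilities := pvUtilityMatrix bl
  -- max(utilities): Python raises ValueError on an empty list; Pre_ gives length ≥ 9
  let max_utility := (PySem.List.max? utilities (fun x => x)).getD 0
  (List.range bl.length).foldl (fun move_list i =>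
    if utilities.getD i 0 = max_utility then
      move_list ++ [String.mk (bl.take i ++ sign.toList ++ bl.drop (i+1))]
    else move_list) []

-- ===== PORT B =====
def pvComboScore (triple : List Char) : Int :=
  let e := triple.count '.'
  if e = 1 then
    if triple.count 'X' = 2 then 1000
    else if triple.count 'O' = 2 then 100
    else 0
  else if e = 2 ∧ triple.count 'X' = 1 then 10
  else if e = 3 then 1
  else 0

def best_moves_from_board_alt (board : String) (sign : String) : List String :=
  let bl := board.toList
  let scores := pvComboIndices.map
    (fun c => pvComboScore [bl.getD c.1 ' ', bl.getD c.2.1 ' ', bl.getD c.2.2 ' '])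
  let utilities := (List.range bl.length).map (fun p =>
    if bl.getD p ' ' ≠ '.' then (-1 : Int)
    else (((pvComboIndices.zip scores).filter
      (fun cs => p = cs.1.1 ∨ p = cs.1.2.1 ∨ p = cs.1.2.2)).map (fun cs => cs.2)).sum)
  let m := (PySem.List.max? utilities (fun x => x)).getD 0
  (List.range bl.length).filterMap (fun p =>
    if utilities.getD p 0 = m then
      some (String.mk (bl.take p ++ sign.toList ++ bl.drop (p+1)))
    else none)

-- ===== PRECONDITION & SPEC =====
-- A indexes board[0..8] and takes max of the utilities: any board shorter than 9 characters
-- raises IndexError (both programs raise there); Pre_ excludes exactly those.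
def Pre_best_moves_from_board (board : String) (sign : String) : Prop := 9 ≤ board.toList.length
instance (board : String) (sign : String) : Decidable (Pre_best_moves_from_board board sign) := by
  unfold Pre_best_moves_from_board; infer_instance

def pvWitness_best_moves_from_board : String × String := ("X.O...X..", "O")

def Spec_best_moves_from_board (board : String) (sign : String) (out : List String) : Prop := out = best_moves_from_board_alt board sign
instance (board : String) (sign : String) (out : List String) : Decidable (Spec_best_moves_from_board board sign out) := by unfold Spec_best_moves_from_board; infer_instance

-- ===== CLAIM (what is proved, stated in full; the proofs are below) =====
def Claim_equal_best_moves_from_board : Prop := ∀ (board : String) (sign : String), Dom_best_moves_from_board board sign → Pre_best_moves_from_board board sign → Spec_best_moves_from_board board sign (best_moves_from_board board sign)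

-- ===== LEMMAS AND PROOFS =====

lemma pvComboScore_nonneg (t : List Char) : 0 ≤ pvComboScore t := by
  unfold pvComboScore; dsimp only; split_ifs <;> norm_num

lemma pvSetG_length (u : List Int) (i : Nat) (pts : Int) :
    (pvSetG u i pts).length = u.length := by
  unfold pvSetG; split_ifs <;> simp

lemma pvSetG_getD (u : List Int) (i : Nat) (pts : Int) (hi : i < u.length) (p : Nat) :
    (pvSetG u i pts).getD p 0 =
      if p = i ∧ 0 ≤ u.getD p 0 then u.getD p 0 + pts else u.getD p 0 := by
  unfold pvSetG
  by_cases hpi : p = i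
  · subst hpi
    have hval : u.getD p 0 = u[p] := by
      simp [List.getD_eq_getElem?_getD, List.getElem?_eq_getElem hi]
    by_cases h0 : 0 ≤ u[p]
    · simp [hval, h0, List.getD_eq_getElem?_getD, List.getElem?_set, hi]
    · simp [h0, List.getD_eq_getElem?_getD, List.getElem?_eq_getElem hi]
  · have hip : i ≠ p := fun h => hpi h.symm
    split_ifs with h0 <;>
      simp_all [List.getD_eq_getElem?_getD, List.getElem?_set, hip]

lemma pvAddScore_length (u : List Int) (i j k : Nat) (pts : Int) :
    (pvAddScore u i j k pts).length = u.length := by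
  unfold pvAddScore; simp [pvSetG_length]

lemma pvStep_length (bl : List Char) (u : List Int) (c : Nat × Nat × Nat) :
    (pvStep bl u c).length = u.length := by
  unfold pvStep; dsimp only; split_ifs <;> simp [pvAddScore_length]

lemma pvAddScore_getD (u : List Int) (i j k : Nat) (pts : Int)
    (hij : i ≠ j) (hik : i ≠ k) (hjk : j ≠ k)
    (hi : i < u.length) (hj : j < u.length) (hk : k < u.length) (p : Nat) :
    (pvAddScore u i j k pts).getD p 0 =
      if (p = i ∨ p = j ∨ p = k) ∧ 0 ≤ u.getD p 0 then u.getD p 0 + pts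
      else u.getD p 0 := by
  unfold pvAddScore
  rw [pvSetG_getD _ k pts (by rw [pvSetG_length, pvSetG_length]; exact hk) p,
      pvSetG_getD _ j pts (by rw [pvSetG_length]; exact hj) p,
      pvSetG_getD u i pts hi p]
  by_cases hpi : p = i <;> by_cases hpj : p = j <;> by_cases hpk : p = k <;>
    split_ifs <;> omega

lemma pvStep_getD (bl : List Char) (u : List Int) (c : Nat × Nat × Nat)
    (hd1 : c.1 ≠ c.2.1) (hd2 : c.1 ≠ c.2.2) (hd3 : c.2.1 ≠ c.2.2)
    (h1 : c.1 < u.length) (h2 : c.2.1 < u.length) (h3 : c.2.2 < u.length) (p : Nat) :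
    (pvStep bl u c).getD p 0 =
      if (p = c.1 ∨ p = c.2.1 ∨ p = c.2.2) ∧ 0 ≤ u.getD p 0 then
        u.getD p 0 + pvComboScore [bl.getD c.1 ' ', bl.getD c.2.1 ' ', bl.getD c.2.2 ' ']
      else u.getD p 0 := by
  unfold pvStep pvComboScore
  dsimp only
  split_ifs <;>
    (try rw [pvAddScore_getD u c.1 c.2.1 c.2.2 _ hd1 hd2 hd3 h1 h2 h3 p]) <;>
    (try split_ifs) <;> omega

-- the loop invariant: after folding pvStep over cs, each in-range cell holds
-- its base value plus the gathered scores of the combos in cs containing it (or -1 if occupied)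
lemma pvFold_getD (bl : List Char) (cs : List (Nat × Nat × Nat)) (u : List Int)
    (hlen : u.length = bl.length) (h9 : 9 ≤ bl.length)
    (hc : ∀ c ∈ cs, c.1 ≠ c.2.1 ∧ c.1 ≠ c.2.2 ∧ c.2.1 ≠ c.2.2 ∧ c.1 < 9 ∧ c.2.1 < 9 ∧ c.2.2 < 9)
    (base : Nat → Int) (hbase : ∀ p, 0 ≤ base p)
    (hu : ∀ p, p < bl.length → u.getD p 0 = if bl.getD p ' ' = '.' then base p else -1) :
    ∀ p, p < bl.length → (cs.foldl (pvStep bl) u).getD p 0 =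
      if bl.getD p ' ' = '.' then
        base p + ((cs.filter (fun c => p = c.1 ∨ p = c.2.1 ∨ p = c.2.2)).map
          (fun c => pvComboScore [bl.getD c.1 ' ', bl.getD c.2.1 ' ', bl.getD c.2.2 ' '])).sum
      else -1 := by
  induction cs generalizing u base with
  | nil => intro p hp; simpa using hu p hp
  | cons c cs ih =>
    intro p hp
    obtain ⟨hd1, hd2, hd3, hb1, hb2, hb3⟩ := hc c (List.mem_cons_self)
    have hsc := pvComboScore_nonneg [bl.getD c.1 ' ', bl.getD c.2.1 ' ', bl.getD c.2.2 ' ']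
    simp only [List.foldl_cons]
    rw [ih (pvStep bl u c)
      (by rw [pvStep_length]; exact hlen)
      (fun c' hc' => hc c' (List.mem_cons_of_mem _ hc'))
      (fun q => base q + (if q = c.1 ∨ q = c.2.1 ∨ q = c.2.2 then
        pvComboScore [bl.getD c.1 ' ', bl.getD c.2.1 ' ', bl.getD c.2.2 ' '] else 0))
      (fun q => by
        have h1 := hbase q
        have h2 := pvComboScore_nonneg [bl.getD c.1 ' ', bl.getD c.2.1 ' ', bl.getD c.2.2 ' ']
        by_cases hin : q = c.1 ∨ q = c.2.1 ∨ q = c.2.2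
        · simp only [if_pos hin]; omega
        · simp only [if_neg hin]; omega)
      ?_ p hp]
    · by_cases hemp : bl.getD p ' ' = '.'
      · by_cases hin : p = c.1 ∨ p = c.2.1 ∨ p = c.2.2 <;>
          simp_all [List.filter_cons] <;> ring
      · simp_all
    · intro q hq
      rw [pvStep_getD bl u c hd1 hd2 hd3 (by omega) (by omega) (by omega) q, hu q hq]
      have hb := hbase q
      by_cases hemp : bl.getD q ' ' = '.'
      · by_cases hin : q = c.1 ∨ q = c.2.1 ∨ q = c.2.2 <;> simp_all
      · simp_all

lemma pvFold_length (bl : List Char) (cs : List (Nat × Nat × Nat)) (u : List Int) :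
    (cs.foldl (pvStep bl) u).length = u.length := by
  induction cs generalizing u with
  | nil => rfl
  | cons c cs ih => simp [List.foldl_cons, ih, pvStep_length]

-- the utilities lists of A and B coincide
lemma pvUtil_eq (bl : List Char) (h9 : 9 ≤ bl.length) :
    pvUtilityMatrix bl = (List.range bl.length).map (fun p =>
      if bl.getD p ' ' ≠ '.' then (-1 : Int)
      else ((pvComboIndices.filter (fun c => p = c.1 ∨ p = c.2.1 ∨ p = c.2.2)).map
        (fun c => pvComboScore [bl.getD c.1 ' ', bl.getD c.2.1 ' ', bl.getD c.2.2 ' '])).sum) := by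
  have hlenA : (pvUtilityMatrix bl).length = bl.length := by
    unfold pvUtilityMatrix pvInitUtilityMatrix; rw [pvFold_length]; simp
  apply List.ext_getElem (by simpa using hlenA)
  intro p hpA hpB
  have hp : p < bl.length := by simpa using hpB
  have hA : (pvUtilityMatrix bl).getD p 0 =
      if bl.getD p ' ' = '.' then
        0 + ((pvComboIndices.filter (fun c => p = c.1 ∨ p = c.2.1 ∨ p = c.2.2)).map
          (fun c => pvComboScore [bl.getD c.1 ' ', bl.getD c.2.1 ' ', bl.getD c.2.2 ' '])).sum
      else -1 := by
    unfold pvUtilityMatrix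
    exact pvFold_getD bl pvComboIndices (pvInitUtilityMatrix bl)
      (by simp [pvInitUtilityMatrix]) h9 (by decide) (fun _ => 0) (fun _ => le_refl 0)
      (by
        intro q hq
        unfold pvInitUtilityMatrix
        rw [List.getD_eq_getElem?_getD, List.getElem?_map]
        rw [List.getElem?_eq_getElem hq]
        simp only [Option.map_some, Option.getD_some]
        rw [List.getD_eq_getElem?_getD, List.getElem?_eq_getElem hq]
        rfl) p hp
  have hgd : (pvUtilityMatrix bl).getD p 0 = (pvUtilityMatrix bl)[p] := by
    rw [List.getD_eq_getElem?_getD, List.getElem?_eq_getElem hpA]; rfl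
  rw [← hgd, hA]
  simp only [List.getElem_map, List.getElem_range]
  by_cases hemp : bl.getD p ' ' = '.' <;> simp [hemp]

-- B's 'sum of zipped scores over the combos containing p' is the direct filtered sum
lemma pvZipFilter {β : Type} (l : List (Nat × Nat × Nat)) (f : Nat × Nat × Nat → β) (p : Nat) :
    (((l.zip (l.map f)).filter
        (fun cs => p = cs.1.1 ∨ p = cs.1.2.1 ∨ p = cs.1.2.2)).map (fun cs => cs.2)) =
      (l.filter (fun c => p = c.1 ∨ p = c.2.1 ∨ p = c.2.2)).map f := by
  simp only [Bool.decide_or]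
  induction l with
  | nil => rfl
  | cons a l ih =>
    simp only [List.map_cons, List.zip_cons_cons, List.filter_cons]
    by_cases h : (decide (p = a.1) || (decide (p = a.2.1) || decide (p = a.2.2))) = true <;>
      simp [h, ih]

-- the two emit loops: A's append-fold equals B's filterMap
lemma pvEmit (utilities : List Int) (m : Int) (g : Nat → String) (l : List Nat)
    (acc : List String) :
    l.foldl (fun acc i => if utilities.getD i 0 = m then acc ++ [g i] else acc) acc =
      acc ++ l.filterMap (fun p => if utilities.getD p 0 = m then some (g p) else none) := by
  simp only [List.getD_eq_getElem?_getD]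
  induction l generalizing acc with
  | nil => simp
  | cons a l ih =>
    by_cases h : utilities[a]?.getD 0 = m <;> simp [List.filterMap_cons, h, ih]

-- ===== VERDICT (by name: the statement is the Claim_ definition above) =====
theorem best_moves_from_board_spec : Claim_equal_best_moves_from_board := by
  intro board sign _hDom hPre
  unfold Spec_best_moves_from_board best_moves_from_board best_moves_from_board_alt
  dsimp only
  have h9 : 9 ≤ board.toList.length := hPre
  simp only [pvZipFilter]
  rw [pvUtil_eq board.toList h9]
  exact pvEmit _ _ _ _ []
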